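-- pv_equiv track=rewrite | github.com/guanjieshen/uc-data-advisor | src/setup/generate_domain.py | _infer_org_name
-- ===== SOURCE A (Python) =====
-- def _infer_org_name(catalog_names: list[str]) -> str:
--     """Find common prefix across catalog names to infer org name."""
--     if not catalog_names:
--         return ""
--
--     # Split on underscores and find common prefix parts
--     parts_list = [name.split("_") for name in catalog_names]
--     if len(parts_list) == 1:
--         # Single catalog: use first part
--         return _titlecase(parts_list[0][0])
--
--     # Find common prefix parts
--     common = []
--     for i, part in enumerate(parts_list[0]):
--         if all(len(parts) > i and parts[i] == part for parts in parts_list):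
--             common.append(part)
--         else:
--             break
--
--     if common:
--         return _titlecase("_".join(common))
--
--     # No common prefix — use first catalog's first part
--     return _titlecase(parts_list[0][0])
--
-- def _titlecase(s: str) -> str:
--     """Convert snake_case to Title Case."""
--     return " ".join(word.capitalize() for word in s.split("_"))
-- ===== SOURCE B (Python) =====
-- def _common_prefix(a, b):
--     out = []
--     for x, y in zip(a, b):
--         if x != y:
--             break
--         out.append(x)
--     return out
--
--
-- def _infer_org_name(catalog_names: list[str]) -> str:
--     """Find common prefix across catalog names to infer org name."""
--     if not catalog_names:
--         return ""
--
--     parts_list = [name.split("_") for name in catalog_names]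
--
--     if len(parts_list) > 1:
--         common = parts_list[0]
--         for parts in parts_list[1:]:
--             common = _common_prefix(common, parts)
--     else:
--         common = []
--
--     # single catalog and no-common-prefix both fall back to the first part
--     words = common or [parts_list[0][0]]
--     return " ".join(word.capitalize() for word in words)
-- ===== Notes on version B (the rewrite author's own statement) =====
-- stated objective: alternative
-- what changed: The indexed enumerate+all loop that rescans every parts list at each index is replaced by a left fold of a pairwise common_prefix helper over the parts lists, and the result is built in one capitalize/join pass over a words list (with the single-catalog and no-common-prefix fallbacks merged) instead of re-splitting through _titlecase.
import Mathlib
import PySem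

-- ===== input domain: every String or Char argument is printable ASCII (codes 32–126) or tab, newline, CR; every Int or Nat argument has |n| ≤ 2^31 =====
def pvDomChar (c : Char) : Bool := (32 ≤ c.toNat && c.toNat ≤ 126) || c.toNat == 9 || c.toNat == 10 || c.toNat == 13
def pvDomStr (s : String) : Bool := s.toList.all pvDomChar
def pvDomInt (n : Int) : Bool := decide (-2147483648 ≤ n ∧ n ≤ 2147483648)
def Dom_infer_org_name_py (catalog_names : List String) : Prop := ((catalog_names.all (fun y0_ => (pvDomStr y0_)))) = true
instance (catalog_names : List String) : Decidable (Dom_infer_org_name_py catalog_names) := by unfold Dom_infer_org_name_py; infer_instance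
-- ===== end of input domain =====

-- B replaces A's indexed enumerate+all rescan by a fold of a pairwise common-prefix helper and
-- builds the result with one capitalize/join pass over a words list (objective: alternative decomposition).

-- ===== PORT A =====

-- word.capitalize() on ASCII: first char uppercased, rest lowered
def pvCap (s : List Char) : List Char :=
  match s with
  | [] => []
  | c :: cs => PySem.Chars.upperChar c :: PySem.Chars.lower cs

-- _titlecase: " ".join(word.capitalize() for word in s.split("_"))
def pvTitle (s : List Char) : List Char :=
  PySem.Chars.join [' '] ((PySem.Chars.splitOn s ['_']).map pvCap)

-- the `for i, part in enumerate(parts_list[0])` loop with its `break`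
def pvALoop (parts_list : List (List (List Char))) (i : Nat) : List (List Char) → List (List Char)
  | [] => []
  | part :: rest =>
    if parts_list.all (fun parts => decide (i < parts.length) && (parts.getD i [] == part)) then
      part :: pvALoop parts_list (i + 1) rest
    else []

def infer_org_name_py (catalog_names : List String) : String :=
  if catalog_names.isEmpty then "" else
  let parts_list := catalog_names.map (fun name => PySem.Chars.splitOn name.toList ['_'])
  -- parts_list[0][0]: str.split never returns an empty list, so index 0 is always in range (headD is exact)
  if parts_list.length == 1 then
    String.ofList (pvTitle ((parts_list.headD []).headD []))
  else
    let common := pvALoop parts_list 0 (parts_list.headD [])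
    if common.isEmpty then String.ofList (pvTitle ((parts_list.headD []).headD []))
    else String.ofList (pvTitle (PySem.Chars.join ['_'] common))

-- ===== PORT B =====

-- _common_prefix(a, b): matching leading parts of the two lists, stop at first mismatch
def pvCommonPrefix (a b : List (List Char)) : List (List Char) :=
  match a, b with
  | x :: xs, y :: ys => if x == y then x :: pvCommonPrefix xs ys else []
  | _, _ => []

def infer_org_name_py_alt (catalog_names : List String) : String :=
  if catalog_names.isEmpty then "" else
  let parts_list := catalog_names.map (fun n => PySem.Chars.splitOn n.toList ['_'])
  -- reduce(_common_prefix, parts_list[1:], parts_list[0]) when there is more than one name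
  let common := if 1 < parts_list.length then
      (parts_list.tail).foldl pvCommonPrefix (parts_list.headD []) else []
  -- words = common or [parts_list[0][0]]  (split never returns an empty list, so headD is exact)
  let words := if common.isEmpty then [(parts_list.headD []).headD []] else common
  String.ofList (PySem.Chars.join [' '] (words.map pvCap))

-- ===== PRECONDITION & SPEC =====
def Spec_infer_org_name_py (catalog_names : List String) (out : String) : Prop := out = infer_org_name_py_alt catalog_names
instance (catalog_names : List String) (out : String) : Decidable (Spec_infer_org_name_py catalog_names out) := by unfold Spec_infer_org_name_py; infer_instance

-- ===== CLAIM (what is proved, stated in full; the proofs are below) =====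
def Claim_equal_infer_org_name_py : Prop := ∀ (catalog_names : List String), Dom_infer_org_name_py catalog_names → Spec_infer_org_name_py catalog_names (infer_org_name_py catalog_names)

-- ===== LEMMAS AND PROOFS =====

theorem go_nil (fuel : Nat) (cur : List Char) (acc : List (List Char)) :
    PySem.Chars.splitOn.go ['_'] fuel [] cur acc = (cur.reverse :: acc).reverse := by
  cases fuel <;> simp [PySem.Chars.splitOn.go]

theorem go_sep (fuel : Nat) (l cur : List Char) (acc : List (List Char)) :
    PySem.Chars.splitOn.go ['_'] (fuel+1) ('_' :: l) cur acc
      = PySem.Chars.splitOn.go ['_'] fuel l [] (cur.reverse :: acc) := by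
  simp [PySem.Chars.splitOn.go, List.isPrefixOf]

theorem go_char (fuel : Nat) (c : Char) (l cur : List Char) (acc : List (List Char)) (hc : c ≠ '_') :
    PySem.Chars.splitOn.go ['_'] (fuel+1) (c :: l) cur acc
      = PySem.Chars.splitOn.go ['_'] fuel l (c :: cur) acc := by
  simp [PySem.Chars.splitOn.go, List.isPrefixOf, hc.symm]

-- every piece produced by splitOn on "_" contains no '_'
theorem go_nosep (fuel : Nat) : ∀ (l cur : List Char) (acc : List (List Char)),
    l.length < fuel → '_' ∉ cur → (∀ a ∈ acc, '_' ∉ a) →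
    ∀ x ∈ PySem.Chars.splitOn.go ['_'] fuel l cur acc, '_' ∉ x := by
  induction fuel with
  | zero => intro l cur acc h; exact absurd h (by omega)
  | succ f ih =>
    intro l cur acc hl hcur hacc x hx
    match l with
    | [] =>
      rw [go_nil] at hx
      simp only [List.mem_reverse, List.mem_cons] at hx
      rcases hx with hx | hx
      · subst hx; simpa using hcur
      · exact hacc _ hx
    | c :: rest =>
      by_cases hc : c = '_'
      · subst hc
        rw [go_sep] at hx
        refine ih rest [] (cur.reverse :: acc) (by simpa using hl) (by simp) ?_ x hx
        intro a ha
        simp at ha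
        rcases ha with ha | ha
        · intro h; exact hcur (by simpa [ha] using h)
        · exact hacc _ ha
      · rw [go_char _ _ _ _ _ hc] at hx
        refine ih rest (c :: cur) acc (by simpa using hl) ?_ hacc x hx
        simp [hcur, Ne.symm hc]

theorem splitOn_nosep (s : List Char) : ∀ x ∈ PySem.Chars.splitOn s ['_'], '_' ∉ x := by
  intro x hx
  exact go_nosep (s.length + 1) s [] [] (by omega) (by simp) (by simp) x (by simpa [PySem.Chars.splitOn] using hx)

-- consuming a '_'-free block of characters
theorem go_consume (x : List Char) : ∀ (fuel : Nat) (l cur : List Char) (acc : List (List Char)),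
    '_' ∉ x →
    PySem.Chars.splitOn.go ['_'] (fuel + x.length) (x ++ l) cur acc
      = PySem.Chars.splitOn.go ['_'] fuel l (x.reverse ++ cur) acc := by
  induction x with
  | nil => intro fuel l cur acc _; simp
  | cons c x' ih =>
    intro fuel l cur acc hx
    have hc : c ≠ '_' := fun h => hx (by simp [h])
    have h1 : fuel + (c :: x').length = (fuel + x'.length) + 1 := by simp; omega
    rw [h1]
    rw [show (c :: x') ++ l = c :: (x' ++ l) from rfl]
    rw [go_char _ _ _ _ _ hc]
    rw [ih fuel l (c :: cur) acc (fun h => hx (by simp [h]))]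
    simp

-- splitOn inverts join on '_'-free pieces
theorem go_join (xs : List (List Char)) : ∀ (fuel : Nat) (acc : List (List Char)),
    xs ≠ [] → (∀ a ∈ xs, '_' ∉ a) → (PySem.Chars.join ['_'] xs).length < fuel →
    PySem.Chars.splitOn.go ['_'] fuel (PySem.Chars.join ['_'] xs) [] acc = acc.reverse ++ xs := by
  induction xs with
  | nil => intro _ _ h; exact absurd rfl h
  | cons x xs' ih =>
    intro fuel acc _ hno hfuel
    match xs' with
    | [] =>
      have hj : PySem.Chars.join ['_'] [x] = x := by
        simp [PySem.Chars.join, List.intercalate]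
      rw [hj] at hfuel ⊢
      have h1 : fuel = (fuel - x.length) + x.length := by omega
      have hgo := go_consume x (fuel - x.length) [] [] acc (hno x (by simp))
      simp only [List.append_nil] at hgo
      rw [h1, hgo, go_nil]
      simp
    | y :: ys =>
      have hj : PySem.Chars.join ['_'] (x :: y :: ys) = x ++ '_' :: PySem.Chars.join ['_'] (y :: ys) := by
        simp [PySem.Chars.join, List.intercalate]
      rw [hj] at hfuel ⊢
      have hlen : x.length + 1 + (PySem.Chars.join ['_'] (y :: ys)).length ≤ (x ++ '_' :: PySem.Chars.join ['_'] (y :: ys)).length := by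
        simp; omega
      have h1 : fuel = ((fuel - x.length - 1) + 1) + x.length := by
        simp at hlen hfuel; omega
      rw [h1, go_consume x _ _ _ _ (hno x (by simp))]
      rw [go_sep]
      simp only [List.append_nil, List.reverse_reverse]
      rw [ih (fuel - x.length - 1) (x :: acc) (by simp) (fun a ha => hno a (by simp [ha])) (by simp at hfuel ⊢; omega)]
      simp

theorem splitOn_join (xs : List (List Char)) (hne : xs ≠ []) (hno : ∀ a ∈ xs, '_' ∉ a) :
    PySem.Chars.splitOn (PySem.Chars.join ['_'] xs) ['_'] = xs := by
  simpa [PySem.Chars.splitOn] using go_join xs ((PySem.Chars.join ['_'] xs).length + 1) [] hne hno (by omega)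

theorem splitOn_single (x : List Char) (hx : '_' ∉ x) :
    PySem.Chars.splitOn x ['_'] = [x] := by
  have := splitOn_join [x] (by simp) (by simpa using hx)
  simpa [PySem.Chars.join, List.intercalate] using this

-- shifting the index of A's loop = dropping the first column of every parts list
theorem pvALoop_shift (pl : List (List (List Char))) (i : Nat) : ∀ rest,
    pvALoop pl (i + 1) rest = pvALoop (pl.map (List.drop 1)) i rest := by
  intro rest
  induction rest generalizing i with
  | nil => simp [pvALoop]
  | cons part r ih =>
    have hcond : (pl.all (fun parts => decide (i + 1 < parts.length) && (parts.getD (i + 1) [] == part)))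
        = ((pl.map (List.drop 1)).all (fun parts => decide (i < parts.length) && (parts.getD i [] == part))) := by
      rw [List.all_map]
      congr 1
      funext parts
      match parts with
      | [] => simp
      | c :: t => simp [List.getD]; rfl
    simp only [pvALoop, hcond, ih]

theorem foldl_cp_nil (ps : List (List (List Char))) : ps.foldl pvCommonPrefix [] = [] := by
  induction ps with
  | nil => rfl
  | cons b ps' ih => simpa [pvCommonPrefix] using ih

-- one step of the fold, phrased on the head column
theorem foldl_cp_cons (ps : List (List (List Char))) : ∀ (x : List Char) (xs : List (List Char)),
    ps.foldl pvCommonPrefix (x :: xs)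
      = if ps.all (fun b => decide (0 < b.length) && (b.getD 0 [] == x)) then
          x :: (ps.map (List.drop 1)).foldl pvCommonPrefix xs
        else [] := by
  induction ps with
  | nil => simp
  | cons b ps' ih =>
    intro x xs
    match b with
    | [] => simp [List.foldl, pvCommonPrefix, foldl_cp_nil]
    | y :: ys =>
      by_cases hxy : x = y
      · subst hxy
        simp only [List.foldl, pvCommonPrefix, beq_self_eq_true, if_true]
        rw [ih]
        simp [List.getD]
      · have : (x == y) = false := by simpa using hxy
        simp [List.foldl, pvCommonPrefix, this, foldl_cp_nil, List.getD, Ne.symm hxy]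

-- A's indexed loop computes B's fold
theorem aloop_eq_foldl (p : List (List Char)) : ∀ ps : List (List (List Char)),
    pvALoop (p :: ps) 0 p = ps.foldl pvCommonPrefix p := by
  induction p with
  | nil => intro ps; simp [pvALoop, foldl_cp_nil]
  | cons x xs ih =>
    intro ps
    rw [foldl_cp_cons]
    have hhead : (decide (0 < (x :: xs).length) && ((x :: xs).getD 0 [] == x)) = true := by
      simp [List.getD]
    simp only [pvALoop, List.all_cons, hhead, Bool.true_and]
    by_cases hc : ps.all (fun b => decide (0 < b.length) && (b.getD 0 [] == x)) = true
    · rw [if_pos hc, if_pos hc]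
      rw [pvALoop_shift]
      have : ((x :: xs) :: ps).map (List.drop 1) = xs :: ps.map (List.drop 1) := by simp
      rw [this, ih]
    · rw [if_neg hc, if_neg hc]

theorem cp_prefix (a : List (List Char)) : ∀ b, pvCommonPrefix a b <+: a := by
  induction a with
  | nil => intro b; cases b <;> simp [pvCommonPrefix]
  | cons x xs ih =>
    intro b
    match b with
    | [] => simp [pvCommonPrefix]
    | y :: ys =>
      by_cases h : x = y
      · subst h
        simp only [pvCommonPrefix, beq_self_eq_true, if_true]
        exact (List.cons_prefix_cons).2 ⟨rfl, ih ys⟩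
      · have : (x == y) = false := by simpa using h
        simp [pvCommonPrefix, this]

theorem foldl_cp_prefix (ps : List (List (List Char))) : ∀ p, ps.foldl pvCommonPrefix p <+: p := by
  induction ps with
  | nil => intro p; simp
  | cons b ps' ih =>
    intro p
    exact (ih (pvCommonPrefix p b)).trans (cp_prefix p b)

-- the head part of a split contains no '_'
theorem head_nosep (p : List (List Char)) (hnop : ∀ a ∈ p, '_' ∉ a) : '_' ∉ p.head?.getD [] := by
  cases p with
  | nil => simp
  | cons a t => exact hnop a (by simp)

-- _titlecase on a '_'-free word is just capitalize
theorem title_nosep (x : List Char) (hx : '_' ∉ x) : pvTitle x = pvCap x := by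
  rw [pvTitle, splitOn_single x hx]
  simp [PySem.Chars.join, List.intercalate]

theorem infer_org_name_py_eq (catalog_names : List String) :
    infer_org_name_py catalog_names = infer_org_name_py_alt catalog_names := by
  cases catalog_names with
  | nil => rfl
  | cons n rest =>
    rw [infer_org_name_py, infer_org_name_py_alt]
    simp only [List.map_cons, List.isEmpty_cons, Bool.false_eq_true, if_false,
      List.headD_cons, List.tail_cons]
    have hnop : ∀ a ∈ PySem.Chars.splitOn n.toList ['_'], '_' ∉ a := splitOn_nosep n.toList
    revert hnop
    generalize PySem.Chars.splitOn n.toList ['_'] = p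
    generalize rest.map (fun n => PySem.Chars.splitOn n.toList ['_']) = ps
    intro hnop
    cases ps with
    | nil =>
      simp only [List.length_cons, List.length_nil]
      norm_num
      rw [title_nosep _ (head_nosep p hnop)]
    | cons q qs =>
      have hlen : (((p :: q :: qs).length) == 1) = false := by simp
      have hlen2 : 1 < (p :: q :: qs).length := by simp
      rw [hlen]
      simp only [Bool.false_eq_true, if_false, hlen2, if_true]
      rw [aloop_eq_foldl p (q :: qs)]
      cases hc : (q :: qs).foldl pvCommonPrefix p with
      | nil =>
        simp only [List.isEmpty_nil, if_true]
        norm_num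
        rw [title_nosep _ (head_nosep p hnop)]
      | cons c cs =>
        simp only [List.isEmpty_cons, Bool.false_eq_true, if_false]
        have hpre : (c :: cs) <+: p := hc ▸ foldl_cp_prefix (q :: qs) p
        rw [pvTitle, splitOn_join (c :: cs) (by simp) (fun a ha => hnop a (hpre.subset ha))]

-- ===== VERDICT (by name: the statement is the Claim_ definition above) =====
theorem infer_org_name_py_spec : Claim_equal_infer_org_name_py := by
  intro catalog_names _
  unfold Spec_infer_org_name_py
  exact infer_org_name_py_eq catalog_names
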